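-- pv_equiv track=rewrite | github.com/NIBARGERB-HLDPRO/hldpro-governance | scripts/overlord/validate_backlog_gh_sync.py | find_planned_table
-- ===== SOURCE A (Python) =====
-- def find_planned_table(lines):
--     """Return (header_line_index, list_of_data_lines) for the ## Planned table."""
--     in_planned = False
--     in_table = False
--     header_idx = None
--     data_lines = []
--
--     for i, line in enumerate(lines):
--         stripped = line.strip()
--
--         if stripped.startswith("## Planned"):
--             in_planned = True
--             continue
--
--         if in_planned and stripped.startswith("## "):
--             # Entered next section — stop
--             break
--
--         if in_planned and stripped.startswith("|"):
--             if not in_table: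
--                 # First pipe line is the header row
--                 in_table = True
--                 header_idx = i
--                 continue
--             # Second pipe line is the separator row (---|---|...)
--             if set(stripped.replace("|", "").replace("-", "").replace(":", "").strip()) == set():
--                 # It's a separator line, skip
--                 continue
--             data_lines.append((i + 1, line))  # 1-based line number
--
--     return header_idx, data_lines
-- ===== SOURCE B (Python) =====
-- def find_planned_table(lines):
--     """Return (header_line_index, list_of_data_lines) for the ## Planned table."""
--     start = None
--     for i, line in enumerate(lines):
--         if line.strip().startswith("## Planned"):
--             start = i
--             break
--     if start is None:
--         return None, []
--     section = []
--     for line in lines[start + 1:]: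
--         s = line.strip()
--         if s.startswith("## ") and not s.startswith("## Planned"):
--             break
--         section.append(line)
--     header_idx = None
--     data = []
--     for k, line in enumerate(section, start + 1):
--         s = line.strip()
--         if s.startswith("|"):
--             if header_idx is None:
--                 header_idx = k
--             elif any(c not in "|-:" and not c.isspace() for c in s):
--                 data.append((k + 1, line))
--     return header_idx, data
-- ===== Notes on version B (the rewrite author's own statement) =====
-- stated objective: simpler
-- what changed: A's single pass with in_planned/in_table boolean flags and a break is replaced by three explicit phases: find the '## Planned' heading index, slice the section up to the next non-Planned heading, then classify the section's pipe lines (first pipe = header, data = any pipe line containing a character outside '|-:' and whitespace), replacing A's replace/replace/replace/strip/set separator test by a direct character scan.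
import Mathlib
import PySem

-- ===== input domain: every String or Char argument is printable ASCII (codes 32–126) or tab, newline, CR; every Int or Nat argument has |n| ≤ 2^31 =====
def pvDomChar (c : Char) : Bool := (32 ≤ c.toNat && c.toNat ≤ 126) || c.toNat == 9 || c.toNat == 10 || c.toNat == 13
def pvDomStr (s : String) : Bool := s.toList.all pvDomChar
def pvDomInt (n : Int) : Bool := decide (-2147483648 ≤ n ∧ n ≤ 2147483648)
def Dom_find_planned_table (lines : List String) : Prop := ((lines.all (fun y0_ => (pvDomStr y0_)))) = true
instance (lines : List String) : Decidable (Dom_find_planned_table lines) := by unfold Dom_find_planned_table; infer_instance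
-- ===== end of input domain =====

-- B replaces A's one-pass boolean-flag machine by three explicit phases (find the
-- '## Planned' heading, cut out the section, classify its pipe lines); same results,
-- objective: simpler decomposition (no speed claim).

-- ===== PORT A =====
-- A's single loop with flags; the `break` is the non-recursive `(h, d)` result.
def pvLoopA : List String → Int → Bool → Bool → Option Int → List (Int × String) → Option Int × List (Int × String)
  | [], _, _, _, h, d => (h, d)
  | line :: rest, i, inP, inT, h, d =>
    let stripped := PySem.Str.strip line
    if PySem.Str.startswith stripped "## Planned" then
      pvLoopA rest (i + 1) true inT h d
    else if inP && PySem.Str.startswith stripped "## " then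
      (h, d)
    else if inP && PySem.Str.startswith stripped "|" then
      if !inT then
        pvLoopA rest (i + 1) inP true (some i) d
      else if PySem.Set.equal (PySem.Set.ofList (PySem.Str.strip (PySem.Str.replace (PySem.Str.replace (PySem.Str.replace stripped "|" "") "-" "") ":" "")).toList) (PySem.Set.empty : PySem.Set Char) then
        pvLoopA rest (i + 1) inP inT h d
      else
        pvLoopA rest (i + 1) inP inT h (d ++ [(i + 1, line)])
    else
      pvLoopA rest (i + 1) inP inT h d

def find_planned_table (lines : List String) : Option Int × (List (Int × String)) :=
  pvLoopA lines 0 false false none []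

-- ===== PORT B =====
-- phase 1: index of the first line whose stripped form starts with "## Planned"
def pvFindStart : List String → Int → Option Int
  | [], _ => none
  | line :: rest, i =>
    if PySem.Str.startswith (PySem.Str.strip line) "## Planned" then some i
    else pvFindStart rest (i + 1)

-- phase 2: the section body, up to (not including) the next non-Planned heading
def pvSection : List String → List String
  | [] => []
  | line :: rest =>
    let s := PySem.Str.strip line
    if PySem.Str.startswith s "## " && !PySem.Str.startswith s "## Planned" then []
    else line :: pvSection rest

-- Source B: c not in "|-:" and not c.isspace()
def pvIsDataChar (c : Char) : Bool :=
  !(['|', '-', ':'].contains c) && !PySem.Chars.isspace c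

-- phase 3: first pipe line is the header, later non-separator pipe lines are data
def pvCollect : List String → Int → Option Int → List (Int × String) → Option Int × List (Int × String)
  | [], _, h, d => (h, d)
  | line :: rest, k, h, d =>
    let s := PySem.Str.strip line
    if PySem.Str.startswith s "|" then
      match h with
      | none => pvCollect rest (k + 1) (some k) d
      | some _ =>
        if s.toList.any pvIsDataChar then pvCollect rest (k + 1) h (d ++ [(k + 1, line)])
        else pvCollect rest (k + 1) h d
    else pvCollect rest (k + 1) h d

def find_planned_table_alt (lines : List String) : Option Int × (List (Int × String)) :=
  match pvFindStart lines 0 with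
  | none => (none, [])
  | some start => pvCollect (pvSection (PySem.List.slice lines (some (start + 1)) none)) (start + 1) none []

-- ===== PRECONDITION & SPEC =====
def Spec_find_planned_table (lines : List String) (out : Option Int × (List (Int × String))) : Prop := out = find_planned_table_alt lines
instance (lines : List String) (out : Option Int × (List (Int × String))) : Decidable (Spec_find_planned_table lines out) := by unfold Spec_find_planned_table; infer_instance

-- ===== CLAIM (what is proved, stated in full; the proofs are below) =====
def Claim_equal_find_planned_table : Prop := ∀ (lines : List String), Dom_find_planned_table lines → Spec_find_planned_table lines (find_planned_table lines)

-- ===== LEMMAS AND PROOFS =====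

-- replace with a one-char pattern and empty replacement is a filter
theorem pv_replace_go_single (a : Char) : ∀ (fuel : Nat) (l acc : List Char), l.length ≤ fuel →
    PySem.Chars.replace.go [a] [] fuel l acc = acc.reverse ++ l.filter (fun c => c != a) := by
  intro fuel
  induction fuel with
  | zero =>
    intro l acc hl
    have : l = [] := List.eq_nil_of_length_eq_zero (Nat.le_zero.mp hl)
    subst this
    simp [PySem.Chars.replace.go]
  | succ n ih =>
    intro l acc hl
    cases l with
    | nil => simp [PySem.Chars.replace.go]
    | cons c t =>
      by_cases hc : c = a
      · subst hc
        have hpre : List.isPrefixOf [c] (c :: t) = true := by simp [List.isPrefixOf]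
        simp only [PySem.Chars.replace.go, hpre, if_true, List.length_cons, List.length_nil,
          Nat.zero_add, List.drop_succ_cons, List.drop_zero, List.reverse_nil, List.nil_append]
        rw [ih t acc (Nat.le_of_succ_le_succ (by simpa using hl))]
        simp
      · have hpre : List.isPrefixOf [a] (c :: t) = false := by
          simp [List.isPrefixOf]
          exact fun h => hc h.symm
        simp only [PySem.Chars.replace.go, hpre, Bool.false_eq_true, if_false]
        rw [ih t (c :: acc) (Nat.le_of_succ_le_succ (by simpa using hl))]
        simp [hc]

theorem pv_replace_single (a : Char) (l : List Char) :
    PySem.Chars.replace l [a] [] = l.filter (fun c => c != a) := by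
  simp only [PySem.Chars.replace, List.isEmpty]
  rw [if_neg (by simp), pv_replace_go_single a l.length l [] le_rfl]
  simp

-- strip is empty iff everything is whitespace
theorem pv_strip_eq_nil_iff (l : List Char) :
    PySem.Chars.strip l = [] ↔ ∀ c ∈ l, PySem.Chars.isspace c = true := by
  simp only [PySem.Chars.strip, PySem.Chars.rstrip, PySem.Chars.lstrip]
  constructor
  · intro h c hc
    have h' : List.dropWhile PySem.Chars.isspace (List.dropWhile PySem.Chars.isspace l).reverse = [] := by
      simpa using congrArg List.reverse h
    rw [List.dropWhile_eq_nil_iff] at h'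
    rcases (List.takeWhile_append_dropWhile (p := PySem.Chars.isspace) (l := l)) ▸ hc with hc'
    rw [← List.takeWhile_append_dropWhile (p := PySem.Chars.isspace) (l := l)] at hc
    rcases List.mem_append.mp hc with h1 | h2
    · exact List.mem_takeWhile_imp h1
    · exact h' c (List.mem_reverse.mpr h2)
  · intro h
    have : List.dropWhile PySem.Chars.isspace l = [] := List.dropWhile_eq_nil_iff.mpr h
    simp [this]

-- A's separator test (replace |,-,: away, strip, compare to the empty set)
-- computes the negation of B's any-data-character test.
theorem pv_sep_iff (s : String) :
    PySem.Set.equal (PySem.Set.ofList (PySem.Str.strip (PySem.Str.replace (PySem.Str.replace (PySem.Str.replace s "|" "") "-" "") ":" "")).toList) (PySem.Set.empty : PySem.Set Char)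
      = !(s.toList.any pvIsDataChar) := by
  have hrep : (PySem.Str.strip (PySem.Str.replace (PySem.Str.replace (PySem.Str.replace s "|" "") "-" "") ":" "")).toList
      = PySem.Chars.strip (((s.toList.filter (fun c => c != '|')).filter (fun c => c != '-')).filter (fun c => c != ':')) := by
    rw [PySem.Str.toList_strip, PySem.Str.toList_replace, PySem.Str.toList_replace, PySem.Str.toList_replace]
    rw [show ("|" : String).toList = ['|'] from rfl, show ("-" : String).toList = ['-'] from rfl,
        show (":" : String).toList = [':'] from rfl, show ("" : String).toList = [] from rfl]
    rw [pv_replace_single, pv_replace_single, pv_replace_single]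
  rw [hrep]
  by_cases h : ∀ c ∈ s.toList, (c = '|' ∨ c = '-' ∨ c = ':' ∨ PySem.Chars.isspace c = true)
  · have hempty : PySem.Chars.strip (((s.toList.filter (fun c => c != '|')).filter (fun c => c != '-')).filter (fun c => c != ':')) = [] := by
      rw [pv_strip_eq_nil_iff]
      intro c hc
      simp only [List.mem_filter, bne_iff_ne] at hc
      obtain ⟨⟨⟨hcs, h1⟩, h2⟩, h3⟩ := hc
      rcases h c hcs with h' | h' | h' | h'
      · exact absurd h' h1
      · exact absurd h' h2
      · exact absurd h' h3
      · exact h'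
    have hany : s.toList.any pvIsDataChar = false := by
      rw [List.any_eq_false]
      intro c hc
      rcases h c hc with h' | h' | h' | h'
      · subst h'; decide
      · subst h'; decide
      · subst h'; decide
      · simp [pvIsDataChar, h']
    rw [hempty, hany]
    decide
  · push_neg at h
    obtain ⟨c, hcs, hc1, hc2, hc3, hc4⟩ := h
    have hc4' : PySem.Chars.isspace c = false := Bool.eq_false_iff.mpr hc4
    have hcfilter : c ∈ ((s.toList.filter (fun c => c != '|')).filter (fun c => c != '-')).filter (fun c => c != ':') := by
      simp [List.mem_filter, hcs, hc1, hc2, hc3]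
    have hne : PySem.Chars.strip (((s.toList.filter (fun c => c != '|')).filter (fun c => c != '-')).filter (fun c => c != ':')) ≠ [] := by
      intro hnil
      rw [pv_strip_eq_nil_iff] at hnil
      exact absurd (hnil c hcfilter) (by simp [hc4'])
    have hany : s.toList.any pvIsDataChar = true := by
      rw [List.any_eq_true]
      exact ⟨c, hcs, by simp [pvIsDataChar, hc1, hc2, hc3, hc4']⟩
    rw [hany]
    cases hlist : PySem.Chars.strip (((s.toList.filter (fun c => c != '|')).filter (fun c => c != '-')).filter (fun c => c != ':')) with
    | nil => exact absurd hlist hne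
    | cons x xs =>
      simp only [Bool.not_true]
      rw [Bool.eq_false_iff]
      intro heq
      have hsub : PySem.Set.issubset (PySem.Set.ofList (x :: xs)) PySem.Set.empty = true := by
        unfold PySem.Set.equal at heq
        exact ((Bool.and_eq_true _ _).mp heq).1
      have hmem := (PySem.Set.issubset_iff _ _).mp hsub
      have hx : x ∈ PySem.Set.ofList (x :: xs) := (PySem.Set.mem_ofList _ _).mpr List.mem_cons_self
      simpa [PySem.Set.empty] using hmem x hx

-- a line whose stripped form starts with "## Planned" does not start with "|"
theorem pv_planned_not_pipe (s : String) (h : PySem.Str.startswith s "## Planned" = true) :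
    PySem.Str.startswith s "|" = false := by
  rw [PySem.Str.startswith_eq] at h ⊢
  obtain ⟨t, ht⟩ := (PySem.Chars.startswith_iff _ _).mp h
  rw [show ("## Planned" : String).toList = '#' :: "# Planned".toList from rfl] at ht
  rw [← ht]
  simp [PySem.Chars.startswith, List.isPrefixOf, show ("|" : String).toList = ['|'] from rfl]

-- once inside the Planned section, A's remaining single pass is B's phases 2+3
theorem pv_M : ∀ (ls : List String) (i : Int) (h : Option Int) (d : List (Int × String)),
    pvLoopA ls i true h.isSome h d = pvCollect (pvSection ls) i h d := by
  intro ls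
  induction ls with
  | nil => intro i h d; rfl
  | cons line rest ih =>
    intro i h d
    simp only [pvLoopA, pvSection]
    by_cases hP : PySem.Str.startswith (PySem.Str.strip line) "## Planned" = true
    · have hpipe : PySem.Str.startswith (PySem.Str.strip line) "|" = false := pv_planned_not_pipe _ hP
      rw [if_pos hP,
        if_neg (show ¬((PySem.Str.startswith (PySem.Str.strip line) "## " && !PySem.Str.startswith (PySem.Str.strip line) "## Planned") = true) from by
          rw [hP, Bool.not_true, Bool.and_false]; exact Bool.false_ne_true)]
      have hB : pvCollect (line :: pvSection rest) i h d = pvCollect (pvSection rest) (i + 1) h d := by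
        simp only [pvCollect]
        rw [if_neg (show ¬(PySem.Str.startswith (PySem.Str.strip line) "|" = true) from by
          rw [hpipe]; exact Bool.false_ne_true)]
      rw [hB]
      exact ih (i + 1) h d
    · have hP' : PySem.Str.startswith (PySem.Str.strip line) "## Planned" = false := Bool.eq_false_iff.mpr hP
      rw [if_neg hP]
      by_cases hH : PySem.Str.startswith (PySem.Str.strip line) "## " = true
      · rw [if_pos (show (true && PySem.Str.startswith (PySem.Str.strip line) "## ") = true from by
            rw [Bool.true_and]; exact hH),
          if_pos (show (PySem.Str.startswith (PySem.Str.strip line) "## " && !PySem.Str.startswith (PySem.Str.strip line) "## Planned") = true from by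
            rw [hH, hP', Bool.not_false, Bool.true_and])]
        rfl
      · have hH' : PySem.Str.startswith (PySem.Str.strip line) "## " = false := Bool.eq_false_iff.mpr hH
        rw [if_neg (show ¬((true && PySem.Str.startswith (PySem.Str.strip line) "## ") = true) from by
            rw [Bool.true_and]; exact hH),
          if_neg (show ¬((PySem.Str.startswith (PySem.Str.strip line) "## " && !PySem.Str.startswith (PySem.Str.strip line) "## Planned") = true) from by
            rw [hH', Bool.false_and]; exact Bool.false_ne_true)]
        by_cases hPipe : PySem.Str.startswith (PySem.Str.strip line) "|" = true
        · rw [if_pos (show (true && PySem.Str.startswith (PySem.Str.strip line) "|") = true from by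
            rw [Bool.true_and]; exact hPipe)]
          cases h with
          | none =>
            simp only [pvCollect, Option.isSome_none, Bool.not_false, if_true]
            rw [if_pos hPipe]
            exact ih (i + 1) (some i) d
          | some v =>
            simp only [pvCollect, Option.isSome_some, Bool.not_true]
            rw [if_neg (show ¬(false = true) from Bool.false_ne_true), if_pos hPipe, pv_sep_iff]
            by_cases hsep : (PySem.Str.strip line).toList.any pvIsDataChar = true
            · rw [hsep,
                if_neg (show ¬((!true) = true) from by rw [Bool.not_true]; exact Bool.false_ne_true),
                if_pos rfl]
              exact ih (i + 1) (some v) (d ++ [(i + 1, line)])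
            · have hsep' : (PySem.Str.strip line).toList.any pvIsDataChar = false := Bool.eq_false_iff.mpr hsep
              rw [hsep',
                if_pos (show (!false) = true from by rw [Bool.not_false]),
                if_neg (show ¬(false = true) from Bool.false_ne_true)]
              exact ih (i + 1) (some v) d
        · have hPipe' : PySem.Str.startswith (PySem.Str.strip line) "|" = false := Bool.eq_false_iff.mpr hPipe
          rw [if_neg (show ¬((true && PySem.Str.startswith (PySem.Str.strip line) "|") = true) from by
            rw [Bool.true_and]; exact hPipe)]
          have hB : pvCollect (line :: pvSection rest) i h d = pvCollect (pvSection rest) (i + 1) h d := by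
            simp only [pvCollect]
            rw [if_neg hPipe]
          rw [hB]
          exact ih (i + 1) h d

theorem pv_findStart_le : ∀ (ls : List String) (i s : Int), pvFindStart ls i = some s → i ≤ s := by
  intro ls
  induction ls with
  | nil => intro i s h; simp [pvFindStart] at h
  | cons line rest ih =>
    intro i s h
    simp only [pvFindStart] at h
    split at h
    · injection h with h; omega
    · have := ih (i + 1) s h
      omega

-- A's full loop from the initial state = find the start, then phases 2+3 on the tail
theorem pv_TOP : ∀ (ls : List String) (i : Int), pvLoopA ls i false false none [] =
    (match pvFindStart ls i with
     | none => (none, [])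
     | some s => pvCollect (pvSection (ls.drop ((s - i).toNat + 1))) (s + 1) none []) := by
  intro ls
  induction ls with
  | nil => intro i; rfl
  | cons line rest ih =>
    intro i
    simp only [pvLoopA, pvFindStart]
    by_cases hP : PySem.Str.startswith (PySem.Str.strip line) "## Planned" = true
    · rw [if_pos hP, if_pos hP]
      have hM := pv_M rest (i + 1) none []
      simp only [Option.isSome_none] at hM
      rw [hM]
      have h0 : (i - i).toNat = 0 := by omega
      simp only [h0, List.drop_succ_cons, List.drop_zero]
    · rw [if_neg hP,
        if_neg (show ¬((false && PySem.Str.startswith (PySem.Str.strip line) "## ") = true) from by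
          rw [Bool.false_and]; exact Bool.false_ne_true),
        if_neg (show ¬((false && PySem.Str.startswith (PySem.Str.strip line) "|") = true) from by
          rw [Bool.false_and]; exact Bool.false_ne_true),
        if_neg hP, ih (i + 1)]
      cases hf : pvFindStart rest (i + 1) with
      | none => rfl
      | some s =>
        have hle := pv_findStart_le rest (i + 1) s hf
        simp only []
        have harith : (s - i).toNat + 1 = ((s - (i + 1)).toNat + 1) + 1 := by omega
        rw [harith, List.drop_succ_cons]

-- ===== VERDICT (by name: the statement is the Claim_ definition above) =====
theorem find_planned_table_spec : Claim_equal_find_planned_table := by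
  intro lines _
  unfold Spec_find_planned_table find_planned_table find_planned_table_alt
  rw [pv_TOP lines 0]
  cases hf : pvFindStart lines 0 with
  | none => rfl
  | some s =>
    have hle := pv_findStart_le lines 0 s hf
    simp only []
    rw [PySem.List.slice_from lines (show (0:Int) ≤ s + 1 by omega)]
    have harith : (s + 1).toNat = (s - 0).toNat + 1 := by omega
    rw [harith]
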